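-- pv_equiv track=rewrite | github.com/RoknuzzamanRokon/Scanner-v2 | tesseractOCR.py | enhanced_clean_mrz_line
-- ===== SOURCE A (Python) =====
-- def enhanced_clean_mrz_line(line: str) -> str:
--     """
--     Enhanced MRZ line cleaning with better error correction
--
--     Args:
--         line: Raw MRZ line text
--
--     Returns:
--         Cleaned MRZ line
--     """
--     # Basic cleaning
--     cleaned = line.replace(' ', '').upper()
--
--     # Enhanced character replacements with more patterns
--     replacements = {
--         '0': 'O',  # Zero to O
--         '1': 'I',  # One to I
--         '8': 'B',  # Eight to B
--         '5': 'S',  # Five to S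
--         '6': 'G',  # Six to G
--         '2': 'Z',  # Two to Z
--         '7': 'T',  # Seven to T
--         '9': 'G',  # Nine to G
--         '4': 'A',  # Four to A
--         '3': 'E',  # Three to E
--     }
--
--     # Apply replacements more intelligently
--     if cleaned.startswith('P<') and len(cleaned) > 5:
--         # Only apply in name section for line 1
--         for old, new in replacements.items():
--             if old in cleaned[5:]:
--                 cleaned = cleaned[:5] + cleaned[5:].replace(old, new)
--     else:
--         # For line 2, be more conservative with replacements
--         name_section_end = min(len(cleaned), 15)  # Only replace in name part
--         for old, new in replacements.items():
--             if old in cleaned[:name_section_end]: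
--                 cleaned = cleaned.replace(old, new, 1)  # Only replace first occurrence
--
--     return cleaned
-- ===== SOURCE B (Python) =====
-- _REPL = {'0': 'O', '1': 'I', '8': 'B', '5': 'S', '6': 'G',
--          '2': 'Z', '7': 'T', '9': 'G', '4': 'A', '3': 'E'}
--
--
-- def enhanced_clean_mrz_line(line: str) -> str:
--     cleaned = line.replace(' ', '').upper()
--     if cleaned.startswith('P<') and len(cleaned) > 5:
--         # name section of line 1: rewrite every digit after the intact 5-char prefix
--         return cleaned[:5] + ''.join(_REPL.get(c, c) for c in cleaned[5:])
--     # line 2: one indexed pass; only the first occurrence of each digit,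
--     # and only when that first occurrence lies before index 15, is replaced
--     seen = set()
--     out = []
--     for i, c in enumerate(cleaned):
--         if c in _REPL and c not in seen:
--             seen.add(c)
--             out.append(_REPL[c] if i < 15 else c)
--         else:
--             out.append(c)
--     return ''.join(out)
-- ===== Notes on version B (the rewrite author's own statement) =====
-- stated objective: simpler
-- what changed: A runs ten sequential whole-string replace passes (one per dict entry, with membership pre-checks); B makes a single pass over the cleaned string: a direct per-character translation of the suffix in the P< branch, and one indexed walk with a seen-set that replaces only the first pre-index-15 occurrence of each digit in the conservative branch.
import Mathlib
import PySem

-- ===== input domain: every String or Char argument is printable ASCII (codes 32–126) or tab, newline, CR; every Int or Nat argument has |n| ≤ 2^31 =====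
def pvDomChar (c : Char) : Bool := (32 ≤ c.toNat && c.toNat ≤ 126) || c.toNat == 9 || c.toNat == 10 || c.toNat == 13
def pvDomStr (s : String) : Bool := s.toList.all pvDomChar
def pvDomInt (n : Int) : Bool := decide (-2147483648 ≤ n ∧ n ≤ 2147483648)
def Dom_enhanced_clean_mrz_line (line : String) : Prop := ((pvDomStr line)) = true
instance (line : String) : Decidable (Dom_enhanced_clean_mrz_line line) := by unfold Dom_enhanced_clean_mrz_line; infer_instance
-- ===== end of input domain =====

-- B replaces A's ten sequential full-string replace passes by a single pass over the
-- cleaned string (a direct map after the intact 'P<' prefix; an indexed walk with a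
-- seen-set for the other branch); objective: simpler.


-- the replacements dict of the Python source (same literal in A and in Source B's _REPL)
def pvReps : PySem.Dict Char Char :=
  ⟨[('0','O'),('1','I'),('8','B'),('5','S'),('6','G'),('2','Z'),('7','T'),('9','G'),('4','A'),('3','E')]⟩

-- cleaned = line.replace(' ', '').upper()   (shared first line of A and Source B)
def pvClean (line : String) : List Char :=
  PySem.Chars.upper (PySem.Chars.replace line.toList [' '] [])

-- ===== PORT A =====
-- s.replace(old, new) for the 1-char old/new of the dict above: every occurrence (exact)
def pvReplaceAll (s : List Char) (old new : Char) : List Char :=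
  s.map (fun c => if c = old then new else c)

-- s.replace(old, new, 1) for 1-char old/new: first occurrence only (exact)
def pvReplaceFirst (s : List Char) (old new : Char) : List Char :=
  match s with
  | [] => []
  | c :: t => if c = old then new :: t else c :: pvReplaceFirst t old new

def enhanced_clean_mrz_line (line : String) : String :=
  let cleaned := pvClean line
  let res :=
    if PySem.Chars.startswith cleaned ['P', '<'] && decide (5 < cleaned.length) then
      -- for old, new in replacements.items(): if old in cleaned[5:]: cleaned = cleaned[:5] + cleaned[5:].replace(old, new)
      pvReps.items.foldl
        (fun cl p =>
          if PySem.Chars.isIn [p.1] (cl.drop 5) then cl.take 5 ++ pvReplaceAll (cl.drop 5) p.1 p.2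
          else cl)
        cleaned
    else
      -- name_section_end = min(len(cleaned), 15); Nat min is exact here (both operands ≥ 0)
      let nameSectionEnd := min cleaned.length 15
      -- for old, new in replacements.items(): if old in cleaned[:name_section_end]: cleaned = cleaned.replace(old, new, 1)
      pvReps.items.foldl
        (fun cl p =>
          if PySem.Chars.isIn [p.1] (cl.take nameSectionEnd) then pvReplaceFirst cl p.1 p.2
          else cl)
        cleaned
  String.ofList res

-- ===== PORT B =====
def enhanced_clean_mrz_line_alt (line : String) : String :=
  let cleaned := pvClean line
  if PySem.Chars.startswith cleaned ['P', '<'] && decide (5 < cleaned.length) then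
    -- cleaned[:5] + ''.join(_REPL.get(c, c) for c in cleaned[5:])
    String.ofList (cleaned.take 5 ++ (cleaned.drop 5).map (fun c => PySem.Dict.getD pvReps c c))
  else
    -- seen = set(); out = []; for i, c in enumerate(cleaned): …; return ''.join(out)
    let st :=
      (PySem.List.enumerate cleaned 0).foldl
        (fun (st : PySem.Set Char × List Char) ic =>
          if PySem.Dict.contains pvReps ic.2 && !(PySem.Set.contains st.1 ic.2) then
            -- _REPL[c] is total here (membership just checked), so getD is exact
            (PySem.Set.add st.1 ic.2,
             st.2 ++ [if ic.1 < 15 then PySem.Dict.getD pvReps ic.2 ic.2 else ic.2])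
          else (st.1, st.2 ++ [ic.2]))
        (PySem.Set.empty, [])
    String.ofList st.2

-- ===== PRECONDITION & SPEC =====
def Spec_enhanced_clean_mrz_line (line : String) (out : String) : Prop := out = enhanced_clean_mrz_line_alt line
instance (line : String) (out : String) : Decidable (Spec_enhanced_clean_mrz_line line out) := by unfold Spec_enhanced_clean_mrz_line; infer_instance

-- ===== CLAIM (what is proved, stated in full; the proofs are below) =====
def Claim_equal_enhanced_clean_mrz_line : Prop := ∀ (line : String), Dom_enhanced_clean_mrz_line line → Spec_enhanced_clean_mrz_line line (enhanced_clean_mrz_line line)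

-- ===== LEMMAS AND PROOFS =====

-- 1-char substring test is membership
lemma pv_isIn_singleton (d : Char) (s : List Char) : PySem.Chars.isIn [d] s = true ↔ d ∈ s := by
  rw [PySem.Chars.isIn_iff_infix]
  constructor
  · intro h; exact h.mem (by simp)
  · intro h
    obtain ⟨t1, t2, rfl⟩ := List.mem_iff_append.mp h
    exact ⟨t1, t2, by simp⟩

lemma pv_replaceAll_of_not_mem (s : List Char) (d v : Char) (h : d ∉ s) :
    pvReplaceAll s d v = s := by
  unfold pvReplaceAll
  rw [List.map_congr_left (g := id) (fun c hc => by
    simp only [id]; rw [if_neg]; rintro rfl; exact h hc), List.map_id]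

lemma pv_getD_self_of_not_key (ps : List (Char × Char)) (x : Char)
    (h : ∀ q ∈ ps, x ≠ q.1) : PySem.Dict.getD ⟨ps⟩ x x = x := by
  simp only [PySem.Dict.getD, PySem.Dict.get?]
  rw [List.find?_eq_none.mpr (fun q hq => by simpa using (h q hq).symm)]
  rfl

-- the replace-all loop over the dict pairs is a single map through first-match lookup
lemma pv_genA : ∀ (ps : List (Char × Char)) (s : List Char),
    (∀ p ∈ ps, ∀ q ∈ ps, p.2 ≠ q.1) →
    ps.foldl (fun t p => pvReplaceAll t p.1 p.2) s
      = s.map (fun c => PySem.Dict.getD ⟨ps⟩ c c) := by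
  intro ps
  induction ps with
  | nil => intro s _; simp [PySem.Dict.getD, PySem.Dict.get?]
  | cons p ps ih =>
    intro s h
    have hps : ∀ q ∈ ps, ∀ r ∈ ps, q.2 ≠ r.1 := fun q hq r hr =>
      h q (List.mem_cons_of_mem _ hq) r (List.mem_cons_of_mem _ hr)
    simp only [List.foldl_cons]
    rw [ih _ hps]
    unfold pvReplaceAll
    rw [List.map_map]
    refine List.map_congr_left (fun c _ => ?_)
    simp only [Function.comp]
    by_cases hc : c = p.1
    · subst hc
      rw [if_pos rfl]
      have h2 : ∀ q ∈ ps, p.2 ≠ q.1 := fun q hq =>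
        h p (List.mem_cons_self) q (List.mem_cons_of_mem _ hq)
      rw [pv_getD_self_of_not_key ps p.2 h2]
      simp [PySem.Dict.getD, PySem.Dict.get?]
    · rw [if_neg hc]
      simp only [PySem.Dict.getD, PySem.Dict.get?, List.find?_cons]
      rw [show (p.1 == c) = false from by simpa using fun e => hc e.symm]

-- the P< branch guard keeps the 5-char prefix intact and acts on the suffix
lemma pv_guardA : ∀ (ps : List (Char × Char)) (suf pre : List Char), pre.length = 5 →
    ps.foldl
      (fun cl p =>
        if PySem.Chars.isIn [p.1] (cl.drop 5) then cl.take 5 ++ pvReplaceAll (cl.drop 5) p.1 p.2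
        else cl) (pre ++ suf)
      = pre ++ ps.foldl (fun t p => pvReplaceAll t p.1 p.2) suf := by
  intro ps
  induction ps with
  | nil => intro suf pre _; simp
  | cons p ps ih =>
    intro suf pre hpre
    have hdrop : (pre ++ suf).drop 5 = suf := by rw [← hpre, List.drop_left]
    have htake : (pre ++ suf).take 5 = pre := by rw [← hpre, List.take_left]
    simp only [List.foldl_cons, hdrop, htake]
    by_cases hin : PySem.Chars.isIn [p.1] suf = true
    · rw [if_pos hin, ih _ pre hpre]
    · rw [if_neg hin]
      have hns : p.1 ∉ suf := fun hmem => hin ((pv_isIn_singleton _ _).mpr hmem)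
      rw [pv_replaceAll_of_not_mem suf p.1 p.2 hns]
      exact ih _ pre hpre

-- canonical single pass for the conservative branch: R = digits still to handle
def pvApplyR : List Char → Nat → List Char → List Char
  | _, _, [] => []
  | R, i, c :: t =>
      if c ∈ R then
        (if i < 15 then PySem.Dict.getD pvReps c c else c) :: pvApplyR (R.erase c) (i + 1) t
      else c :: pvApplyR R (i + 1) t

lemma pv_applyR_nil : ∀ (i : Nat) (s : List Char), pvApplyR [] i s = s := by
  intro i s
  induction s generalizing i with
  | nil => rfl
  | cons c t ih => simp [pvApplyR, ih]

lemma pv_length_replaceFirst (s : List Char) (d v : Char) :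
    (pvReplaceFirst s d v).length = s.length := by
  induction s with
  | nil => rfl
  | cons c t ih => by_cases h : c = d <;> simp [pvReplaceFirst, h, ih]

-- one global first-occurrence replacement commutes into the single pass
lemma pv_stepA_commute (d v : Char) (hval : v = PySem.Dict.getD pvReps d d) :
    ∀ (s : List Char) (i : Nat) (R : List Char), d ∉ R → v ∉ R →
    pvApplyR (d :: R) i s
      = pvApplyR R i (if d ∈ s.take (15 - i) then pvReplaceFirst s d v else s) := by
  intro s
  induction s with
  | nil => intro i R _ _; simp [pvApplyR]
  | cons c t ih =>
    intro i R hd hv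
    by_cases hi : i < 15
    · have h15 : 15 - i = (15 - (i + 1)) + 1 := by omega
      rw [h15, List.take_succ_cons]
      by_cases hc : c = d
      · subst hc
        rw [if_pos (List.mem_cons_self), show pvReplaceFirst (c :: t) c v = v :: t from by
          simp [pvReplaceFirst]]
        rw [show pvApplyR (c :: R) i (c :: t)
            = (if i < 15 then PySem.Dict.getD pvReps c c else c) :: pvApplyR R (i + 1) t from by
          simp [pvApplyR]]
        rw [show pvApplyR R i (v :: t) = v :: pvApplyR R (i + 1) t from by
          simp [pvApplyR, hv]]
        rw [if_pos hi, ← hval]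
      · have hmc : (d ∈ c :: t.take (15 - (i + 1))) ↔ (d ∈ t.take (15 - (i + 1))) := by
          constructor
          · intro h
            rcases List.mem_cons.mp h with e | h'
            · exact absurd e (Ne.symm hc)
            · exact h'
          · exact fun h => List.mem_cons_of_mem _ h
        have hcons : (if d ∈ c :: t.take (15 - (i + 1)) then c :: pvReplaceFirst t d v else c :: t)
            = c :: (if d ∈ t.take (15 - (i + 1)) then pvReplaceFirst t d v else t) := by
          rw [if_congr hmc rfl rfl]
          split <;> rfl
        rw [show pvReplaceFirst (c :: t) d v = c :: pvReplaceFirst t d v from by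
          simp [pvReplaceFirst, hc], hcons]
        have herase : (d :: R).erase c = d :: R.erase c :=
          List.erase_cons_tail (by simp [Ne.symm hc])
        by_cases hcR : c ∈ R
        · simp only [pvApplyR, if_pos (List.mem_cons_of_mem d hcR), if_pos hcR, herase]
          rw [ih (i + 1) (R.erase c) (fun h => hd (List.mem_of_mem_erase h))
            (fun h => hv (List.mem_of_mem_erase h))]
        · have hcdR : c ∉ d :: R := by simp [hc, hcR]
          simp only [pvApplyR, if_neg hcdR, if_neg hcR]
          rw [ih (i + 1) R hd hv]
    · have h0 : 15 - i = 0 := by omega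
      rw [h0, List.take_zero, if_neg (List.not_mem_nil)]
      have hi1 : ∀ (R' : List Char), d ∉ R' → v ∉ R' →
          pvApplyR (d :: R') (i + 1) t = pvApplyR R' (i + 1) t := by
        intro R' h1 h2
        rw [ih (i + 1) R' h1 h2, show 15 - (i + 1) = 0 from by omega, List.take_zero,
          if_neg (List.not_mem_nil)]
      by_cases hc : c = d
      · subst hc
        simp only [pvApplyR, if_pos (List.mem_cons_self), if_neg hi,
          List.erase_cons_head, if_neg (show c ∉ R from hd)]
      · have herase : (d :: R).erase c = d :: R.erase c :=
          List.erase_cons_tail (by simp [Ne.symm hc])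
        by_cases hcR : c ∈ R
        · simp only [pvApplyR, if_pos (List.mem_cons_of_mem d hcR), if_pos hcR, if_neg hi,
            herase]
          rw [hi1 (R.erase c) (fun h => hd (List.mem_of_mem_erase h))
            (fun h => hv (List.mem_of_mem_erase h))]
        · have hcdR : c ∉ d :: R := by simp [hc, hcR]
          simp only [pvApplyR, if_neg hcdR, if_neg hcR]
          rw [hi1 R hd hv]

-- A's conservative loop equals the single pass
lemma pv_foldA2 : ∀ (ps : List (Char × Char)) (s : List Char) (n : Nat),
    n = min s.length 15 →
    (∀ p ∈ ps, p.2 = PySem.Dict.getD pvReps p.1 p.1) →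
    (ps.map Prod.fst).Nodup →
    (∀ p ∈ ps, ∀ q ∈ ps, p.2 ≠ q.1) →
    ps.foldl
      (fun cl p =>
        if PySem.Chars.isIn [p.1] (cl.take n) then pvReplaceFirst cl p.1 p.2 else cl) s
      = pvApplyR (ps.map Prod.fst) 0 s := by
  intro ps
  induction ps with
  | nil => intro s n _ _ _ _; simp [pv_applyR_nil]
  | cons p ps ih =>
    intro s n hn hval hnd hcross
    have htk : s.take n = s.take (15 - 0) := by
      rw [hn, Nat.min_comm, ← List.take_take, List.take_length]
    have hiff : PySem.Chars.isIn [p.1] (s.take n) = true ↔ p.1 ∈ s.take (15 - 0) := by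
      rw [pv_isIn_singleton, htk]
    have hnd' : p.1 ∉ ps.map Prod.fst ∧ (ps.map Prod.fst).Nodup := by
      rw [List.map_cons] at hnd; exact List.nodup_cons.mp hnd
    simp only [List.foldl_cons, List.map_cons]
    rw [pv_stepA_commute p.1 p.2
      (hval p List.mem_cons_self)
      s 0 (ps.map Prod.fst)
      hnd'.1
      (by
        intro hmem
        obtain ⟨q, hq, hq2⟩ := List.mem_map.mp hmem
        exact hcross p List.mem_cons_self q (List.mem_cons_of_mem _ hq) hq2.symm)]
    by_cases hin : PySem.Chars.isIn [p.1] (s.take n) = true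
    · rw [if_pos hin, if_pos (hiff.mp hin)]
      exact ih _ n (by rw [hn, pv_length_replaceFirst])
        (fun q hq => hval q (List.mem_cons_of_mem _ hq))
        hnd'.2
        (fun q hq r hr => hcross q (List.mem_cons_of_mem _ hq) r (List.mem_cons_of_mem _ hr))
    · rw [if_neg hin, if_neg (fun h => hin (hiff.mpr h))]
      exact ih _ n hn
        (fun q hq => hval q (List.mem_cons_of_mem _ hq))
        hnd'.2
        (fun q hq r hr => hcross q (List.mem_cons_of_mem _ hq) r (List.mem_cons_of_mem _ hr))

lemma pv_contains_iff (c : Char) :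
    PySem.Dict.contains pvReps c = true ↔ c ∈ pvReps.items.map Prod.fst := by
  simp [PySem.Dict.contains, List.any_eq_true, List.mem_map]

-- B's indexed pass with the seen-set equals the single pass
lemma pv_foldB : ∀ (s : List Char) (k : Nat) (seen : PySem.Set Char) (out : List Char),
    ((PySem.List.enumerate s (k : Int)).foldl
      (fun (st : PySem.Set Char × List Char) ic =>
        if PySem.Dict.contains pvReps ic.2 && !(PySem.Set.contains st.1 ic.2) then
          (PySem.Set.add st.1 ic.2,
           st.2 ++ [if ic.1 < 15 then PySem.Dict.getD pvReps ic.2 ic.2 else ic.2])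
        else (st.1, st.2 ++ [ic.2])) (seen, out)).2
    = out ++ pvApplyR
        ((pvReps.items.map Prod.fst).filter (fun d => !(PySem.Set.contains seen d))) k s := by
  intro s
  induction s with
  | nil => intro k seen out; simp [PySem.List.enumerate_nil, pvApplyR]
  | cons c t ih =>
    intro k seen out
    rw [PySem.List.enumerate_cons, List.foldl_cons,
      show ((k : Int) + 1) = (((k + 1 : Nat)) : Int) from by push_cast; ring]
    have hnodK : (pvReps.items.map Prod.fst).Nodup := by decide
    have hmemR : ∀ x : Char, x ∈ (pvReps.items.map Prod.fst).filter
        (fun d => !(PySem.Set.contains seen d))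
        ↔ (x ∈ pvReps.items.map Prod.fst ∧ x ∉ seen) := by
      intro x; simp [List.mem_filter, PySem.Set.contains]
    have happ : ∀ (e : Char) (z : List Char), out ++ [e] ++ z = out ++ (e :: z) := by
      intro e z; simp
    by_cases h1 : PySem.Dict.contains pvReps c = true
    · by_cases h2 : c ∈ seen
      · -- key already seen: pass through
        have h2b : PySem.Set.contains seen c = true := by
          simpa [PySem.Set.contains] using h2
        rw [show (PySem.Dict.contains pvReps c && !(PySem.Set.contains seen c)) = false from by
          rw [h1, h2b]; rfl]
        simp only [Bool.false_eq_true, if_false]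
        rw [ih (k + 1) seen (out ++ [c])]
        have hcR : c ∉ (pvReps.items.map Prod.fst).filter
            (fun d => !(PySem.Set.contains seen d)) := by
          intro hmem; exact absurd h2 ((hmemR c).mp hmem).2
        rw [show pvApplyR ((pvReps.items.map Prod.fst).filter
              (fun d => !(PySem.Set.contains seen d))) k (c :: t)
            = c :: pvApplyR ((pvReps.items.map Prod.fst).filter
              (fun d => !(PySem.Set.contains seen d))) (k + 1) t from by
          simp only [pvApplyR, if_neg hcR], happ]
      · -- fresh key
        have h2b : PySem.Set.contains seen c = false := by
          simpa [PySem.Set.contains] using h2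
        rw [show (PySem.Dict.contains pvReps c && !(PySem.Set.contains seen c)) = true from by
          rw [h1, h2b]; rfl]
        simp only [if_true]
        rw [ih (k + 1) (PySem.Set.add seen c) _]
        have hcR : c ∈ (pvReps.items.map Prod.fst).filter
            (fun d => !(PySem.Set.contains seen d)) :=
          (hmemR c).mpr ⟨(pv_contains_iff c).mp h1, h2⟩
        have hfilter : ((pvReps.items.map Prod.fst).filter
              (fun d => !(PySem.Set.contains seen d))).erase c
            = (pvReps.items.map Prod.fst).filter
              (fun d => !(PySem.Set.contains (PySem.Set.add seen c) d)) := by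
          rw [List.Nodup.erase_eq_filter (hnodK.filter _) c, List.filter_filter]
          refine List.filter_congr (fun x _ => ?_)
          have hadd : PySem.Set.contains (PySem.Set.add seen c) x
              = (PySem.Set.contains seen x || x == c) := by
            unfold PySem.Set.add
            rw [if_neg (by rw [h2b]; exact Bool.false_ne_true)]
            cases hxc : x == c
            · have hne : ¬ x = c := ne_of_beq_false hxc
              simp [PySem.Set.contains, hne]
            · have hxe : x = c := eq_of_beq hxc
              simp [PySem.Set.contains, hxe]
          rw [hadd]
          cases hxc : x == c
          · have hne : ¬ x = c := ne_of_beq_false hxc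
            simp [hne]
          · have hxe : x = c := eq_of_beq hxc
            simp [hxe, h2]
        have hkif : (if (k : Int) < 15 then PySem.Dict.getD pvReps c c else c)
            = (if k < 15 then PySem.Dict.getD pvReps c c else c) := by
          by_cases hk : k < 15
          · rw [if_pos hk, if_pos (by exact_mod_cast hk)]
          · rw [if_neg hk, if_neg (fun h => hk (by exact_mod_cast h))]
        rw [← hfilter]
        rw [show pvApplyR ((pvReps.items.map Prod.fst).filter
              (fun d => !(PySem.Set.contains seen d))) k (c :: t)
            = (if k < 15 then PySem.Dict.getD pvReps c c else c)
              :: pvApplyR (((pvReps.items.map Prod.fst).filter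
                  (fun d => !(PySem.Set.contains seen d))).erase c) (k + 1) t from by
          simp only [pvApplyR, if_pos hcR], hkif, happ]
    · -- not a key: pass through
      rw [show (PySem.Dict.contains pvReps c && !(PySem.Set.contains seen c)) = false from by
        rw [show PySem.Dict.contains pvReps c = false from by
          cases h : PySem.Dict.contains pvReps c
          · rfl
          · exact absurd h h1]; rfl]
      simp only [Bool.false_eq_true, if_false]
      rw [ih (k + 1) seen (out ++ [c])]
      have hcR : c ∉ (pvReps.items.map Prod.fst).filter
          (fun d => !(PySem.Set.contains seen d)) := by
        intro hmem; exact h1 ((pv_contains_iff c).mpr ((hmemR c).mp hmem).1)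
      rw [show pvApplyR ((pvReps.items.map Prod.fst).filter
            (fun d => !(PySem.Set.contains seen d))) k (c :: t)
          = c :: pvApplyR ((pvReps.items.map Prod.fst).filter
            (fun d => !(PySem.Set.contains seen d))) (k + 1) t from by
        simp only [pvApplyR, if_neg hcR], happ]

-- the P< branch: A's loop = B's map
lemma pv_branch1 (cl : List Char) (h5 : 5 < cl.length) :
    pvReps.items.foldl
      (fun cl p =>
        if PySem.Chars.isIn [p.1] (cl.drop 5) then cl.take 5 ++ pvReplaceAll (cl.drop 5) p.1 p.2
        else cl) cl
    = cl.take 5 ++ (cl.drop 5).map (fun c => PySem.Dict.getD pvReps c c) := by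
  have hlen : (cl.take 5).length = 5 := by rw [List.length_take]; omega
  conv_lhs => rw [show cl = cl.take 5 ++ cl.drop 5 from (List.take_append_drop 5 cl).symm]
  rw [pv_guardA pvReps.items (cl.drop 5) (cl.take 5) hlen,
    pv_genA pvReps.items (cl.drop 5) (by decide)]

-- the conservative branch: A's loop = B's indexed pass
lemma pv_branch2 (cl : List Char) :
    pvReps.items.foldl
      (fun c2 p =>
        if PySem.Chars.isIn [p.1] (c2.take (min cl.length 15)) then pvReplaceFirst c2 p.1 p.2
        else c2) cl
    = ((PySem.List.enumerate cl 0).foldl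
        (fun (st : PySem.Set Char × List Char) ic =>
          if PySem.Dict.contains pvReps ic.2 && !(PySem.Set.contains st.1 ic.2) then
            (PySem.Set.add st.1 ic.2,
             st.2 ++ [if ic.1 < 15 then PySem.Dict.getD pvReps ic.2 ic.2 else ic.2])
          else (st.1, st.2 ++ [ic.2]))
        (PySem.Set.empty, [])).2 := by
  rw [pv_foldA2 pvReps.items cl (min cl.length 15) rfl (by decide) (by decide) (by decide)]
  rw [show (0 : Int) = ((0 : Nat) : Int) from rfl, pv_foldB cl 0 PySem.Set.empty []]
  rw [show (pvReps.items.map Prod.fst).filter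
        (fun d => !(PySem.Set.contains (PySem.Set.empty (α := Char)) d))
      = pvReps.items.map Prod.fst from by decide]
  rw [List.nil_append]

-- ===== VERDICT (by name: the statement is the Claim_ definition above) =====
theorem enhanced_clean_mrz_line_spec : Claim_equal_enhanced_clean_mrz_line := by
  intro line _
  unfold Spec_enhanced_clean_mrz_line enhanced_clean_mrz_line enhanced_clean_mrz_line_alt
  simp only []
  split_ifs with hb
  · have h5 : 5 < (pvClean line).length := of_decide_eq_true ((Bool.and_eq_true _ _).mp hb).2
    exact congrArg String.ofList (pv_branch1 (pvClean line) h5)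
  · exact congrArg String.ofList (pv_branch2 (pvClean line))
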